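-- pv_equiv track=rewrite | github.com/Lenochxd/WebDeck | main_server.py | getarg
-- ===== SOURCE A (Python) =====
-- def getarg(message, arg):
--     return next(
--         (
--             x.split(f"{arg}:", 1)[1].strip()
--             for x in message.split()
--             if x.startswith(f"{arg}:")
--         ),
--         None,
--     )
-- ===== SOURCE B (Python) =====
-- def getarg(message, arg):
--     # single index-based scan over the characters; no token list is built
--     pre = f"{arg}:"
--     n = len(message)
--     i = 0
--     while i < n:
--         if message[i].isspace():
--             i += 1
--         else:
--             j = i + 1
--             while j < n and not message[j].isspace():
--                 j += 1
--             # the token is message[i:j]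
--             if j - i >= len(pre) and message.startswith(pre, i):
--                 return message[i + len(pre):j]
--             i = j
--     return None
-- ===== Notes on version B (the rewrite author's own statement) =====
-- stated objective: alternative
-- what changed: B replaces split()-tokenise-then-filter (which builds the whole token list) with a single index-based scan that delimits one token at a time and returns as soon as the prefixed token is found, slicing out the value directly.
import Mathlib
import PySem

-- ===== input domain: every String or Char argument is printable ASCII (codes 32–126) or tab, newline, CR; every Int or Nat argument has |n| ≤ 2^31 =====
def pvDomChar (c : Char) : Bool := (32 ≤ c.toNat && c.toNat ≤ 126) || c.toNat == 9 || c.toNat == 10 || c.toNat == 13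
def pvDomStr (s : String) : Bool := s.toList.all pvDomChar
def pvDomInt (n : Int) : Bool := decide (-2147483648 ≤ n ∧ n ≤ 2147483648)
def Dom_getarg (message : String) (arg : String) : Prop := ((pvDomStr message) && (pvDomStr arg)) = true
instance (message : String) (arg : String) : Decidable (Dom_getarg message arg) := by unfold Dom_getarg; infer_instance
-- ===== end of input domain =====

-- B replaces A's tokenise(split)-then-filter with a single index scan over the characters (no token list is built); objective: alternative.

-- ===== PORT A =====
-- next((x.split(f"{arg}:",1)[1].strip() for x in message.split() if x.startswith(f"{arg}:")), None)
def getarg (message : String) (arg : String) : Option String :=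
  let sep := arg.toList ++ [':']
  match (PySem.Chars.split₀ message.toList).find? (fun x => PySem.Chars.startswith x sep) with
  | none => none
  | some x =>
    match PySem.Chars.splitMax? x sep 1 with
    | none => none            -- unreachable: sep ends in ':' so sep ≠ ""
    | some parts =>
      match PySem.List.pyGet? parts 1 with
      | none => none          -- unreachable: sep is a prefix of x, so parts has ≥ 2 pieces
      | some t => some (String.mk (PySem.Chars.strip t))

-- ===== PORT B =====
-- Source B's outer while-loop: skip one space, or delimit the token starting here (the inner j-loop
-- 'walk to the next whitespace' is takeWhile/dropWhile on the tail) and test/return or move past it.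
def scanB (pre : List Char) : List Char → Option (List Char)
  | [] => none
  | c :: cs =>
    if PySem.Chars.isspace c then scanB pre cs
    else
      let tok := c :: cs.takeWhile (fun d => !PySem.Chars.isspace d)
      if pre.isPrefixOf tok then some (tok.drop pre.length)
      else scanB pre (cs.dropWhile (fun d => !PySem.Chars.isspace d))
termination_by l => l.length
decreasing_by
  · simp
  · simpa using Nat.lt_succ_of_le (List.length_dropWhile_le _ _)

def getarg_alt (message : String) (arg : String) : Option String :=
  (scanB (arg.toList ++ [':']) message.toList).map String.mk

-- ===== PRECONDITION & SPEC =====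
def Spec_getarg (message : String) (arg : String) (out : Option String) : Prop := out = getarg_alt message arg
instance (message : String) (arg : String) (out : Option String) : Decidable (Spec_getarg message arg out) := by unfold Spec_getarg; infer_instance

-- ===== CLAIM (what is proved, stated in full; the proofs are below) =====
def Claim_equal_getarg : Prop := ∀ (message : String) (arg : String), Dom_getarg message arg → Spec_getarg message arg (getarg message arg)

-- ===== LEMMAS AND PROOFS =====

-- the whitespace-split word list, in the recursion shape of scanB
def words : List Char → List (List Char)
  | [] => []
  | c :: cs =>
    if PySem.Chars.isspace c then words cs
    else (c :: cs.takeWhile (fun d => !PySem.Chars.isspace d)) :: words (cs.dropWhile (fun d => !PySem.Chars.isspace d))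
termination_by l => l.length
decreasing_by
  · simp
  · simpa using Nat.lt_succ_of_le (List.length_dropWhile_le _ _)

lemma split₀_go_eq (s : List Char) : ∀ cur acc, PySem.Chars.split₀.go s cur acc =
    acc.reverse ++ (if cur.isEmpty then words s
      else (cur.reverse ++ s.takeWhile (fun d => !PySem.Chars.isspace d)) ::
        words (s.dropWhile (fun d => !PySem.Chars.isspace d))) := by
  induction s with
  | nil =>
    intro cur acc
    simp only [PySem.Chars.split₀.go]
    split_ifs <;> simp [words]
  | cons c rest ih =>
    intro cur acc
    by_cases hc : PySem.Chars.isspace c = true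
    · by_cases hcur : cur.isEmpty = true
      · have hnil : cur = [] := by simpa using hcur
        simp [PySem.Chars.split₀.go, hc, hcur, ih, words, hnil]
      · simp [PySem.Chars.split₀.go, hc, hcur, ih, words]
    · have h1 := ih (c :: cur) acc
      simp only [List.isEmpty_cons] at h1
      by_cases hcur : cur.isEmpty = true
      · have hnil : cur = [] := by simpa using hcur
        subst hnil
        simp [PySem.Chars.split₀.go, hc, h1, words.eq_2]
      · simp [PySem.Chars.split₀.go, hc, hcur, h1, List.takeWhile_cons]

lemma split₀_eq_words (s : List Char) : PySem.Chars.split₀ s = words s := by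
  simpa using split₀_go_eq s [] []

lemma words_nospace : ∀ (s x : List Char), x ∈ words s → ∀ c ∈ x, PySem.Chars.isspace c = false := by
  intro s
  fun_induction words s with
  | case1 => intro x hx; simp at hx
  | case2 c cs hc ih =>
    intro x hx
    exact ih x hx
  | case3 c cs hc ih =>
    intro x hx
    rcases List.mem_cons.mp hx with h | h
    · subst h
      intro d hd
      rcases List.mem_cons.mp hd with h | h
      · subst h; simpa using hc
      · have := List.mem_takeWhile_imp h; simpa using this
    · exact ih x h

lemma dropWhile_eq_self_of_all {p : Char → Bool} {l : List Char} (h : ∀ c ∈ l, p c = false) :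
    l.dropWhile p = l := by
  cases l with
  | nil => rfl
  | cons a t => simp [List.dropWhile_cons, h a (List.mem_cons_self ..)]

lemma strip_of_nospace {x : List Char} (h : ∀ c ∈ x, PySem.Chars.isspace c = false) :
    PySem.Chars.strip x = x := by
  unfold PySem.Chars.strip PySem.Chars.lstrip PySem.Chars.rstrip
  rw [dropWhile_eq_self_of_all h]
  rw [dropWhile_eq_self_of_all (fun c hc => h c (List.mem_reverse.mp hc))]
  simp

lemma splitOnMax_go_zero (sep : List Char) : ∀ (f : Nat) (l : List Char),
    PySem.Chars.splitOnMax.go sep f 0 l [] [[]] = [[], l] := by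
  intro f l
  cases f <;> cases l <;> simp [PySem.Chars.splitOnMax.go]

lemma splitOnMax_prefix {sep x : List Char} (hs : sep ≠ []) (hp : sep.isPrefixOf x = true) :
    PySem.Chars.splitOnMax x sep 1 = [[], x.drop sep.length] := by
  cases x with
  | nil =>
    cases sep with
    | nil => exact absurd rfl hs
    | cons a t => simp [List.isPrefixOf] at hp
  | cons c rest =>
    unfold PySem.Chars.splitOnMax
    rw [if_neg (by norm_num)]
    show PySem.Chars.splitOnMax.go sep ((c :: rest).length + 1) 1 (c :: rest) [] [] = _
    rw [show (c :: rest).length + 1 = rest.length + 2 from by simp]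
    rw [PySem.Chars.splitOnMax.go]
    simp only [hp, if_true, one_ne_zero, if_false]
    simpa using splitOnMax_go_zero sep (rest.length + 1) ((c :: rest).drop sep.length)

lemma scanB_eq_find (pre : List Char) (s : List Char) :
    scanB pre s = ((words s).find? (fun x => pre.isPrefixOf x)).map (fun x => x.drop pre.length) := by
  fun_induction scanB pre s with
  | case1 => simp [words]
  | case2 c cs hc ih => rw [words.eq_2, if_pos hc]; exact ih
  | case3 c cs hc tok hp => rw [words.eq_2, if_neg hc, List.find?_cons_of_pos hp]; rfl
  | case4 c cs hc tok hp ih => rw [words.eq_2, if_neg hc, List.find?_cons_of_neg hp]; exact ih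

-- ===== VERDICT (by name: the statement is the Claim_ definition above) =====
theorem getarg_spec : Claim_equal_getarg := by
  intro message arg _
  unfold Spec_getarg getarg getarg_alt
  rw [split₀_eq_words, scanB_eq_find]
  have hsep : arg.toList ++ [':'] ≠ [] := by simp
  simp only [PySem.Chars.startswith]
  cases hf : (words message.toList).find? (fun x => (arg.toList ++ [':']).isPrefixOf x) with
  | none => simp
  | some x =>
    have hp : (arg.toList ++ [':']).isPrefixOf x = true := by
      simpa using List.find?_some hf
    have hmem : x ∈ words message.toList := List.mem_of_find?_eq_some hf
    have hmax : PySem.Chars.splitMax? x (arg.toList ++ [':']) 1 =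
        some [[], x.drop (arg.toList ++ [':']).length] := by
      simp [PySem.Chars.splitMax?, hsep, splitOnMax_prefix hsep hp]
    have hns : ∀ c ∈ x.drop (arg.length + 1), PySem.Chars.isspace c = false :=
      fun c hc => words_nospace message.toList x hmem c (List.mem_of_mem_drop hc)
    simp only [hmax]
    simp [PySem.List.pyGet?, PySem.List.pyIdx?, strip_of_nospace hns]
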